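-- pv_equiv track=rewrite | github.com/isaac-perez7053/GLYZE | src/glyze/gromacs.py | make_chain_resname_map
-- ===== SOURCE A (Python) =====
-- from typing import Dict
--
-- def make_chain_resname_map(resname_map: Dict[object, str]) -> Dict[str, str]:
--     """
--     Convert {glyceride_obj: 'RESN'} -> {'A': 'RESN', 'B': 'RESN2', ...}
--     """
--
--     def chain_label(n: int) -> str:
--         label = ""
--         while True:
--             n, r = divmod(n, 26)
--             label = chr(ord("A") + r) + label
--             if n == 0:
--                 break
--             n -= 1
--         return label
--
--     chain_map = {}
--     for idx, (_, resname) in enumerate(resname_map.items()):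
--         chain_map[chain_label(idx)] = resname
--     return chain_map
-- ===== SOURCE B (Python) =====
-- def make_chain_resname_map(resname_map):
--     """
--     Convert {glyceride_obj: 'RESN'} -> {'A': 'RESN', 'B': 'RESN2', ...}
--     Maintains the current chain label incrementally (odometer in bijective
--     base 26) instead of recomputing it from the index each time.
--     """
--
--     def next_label(label: str) -> str:
--         chars = list(label)
--         i = len(chars) - 1
--         while i >= 0 and chars[i] == "Z":
--             chars[i] = "A"
--             i -= 1
--         if i < 0:
--             return "A" + "".join(chars)
--         chars[i] = chr(ord(chars[i]) + 1)
--         return "".join(chars)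
--
--     chain_map = {}
--     label = "A"
--     for resname in resname_map.values():
--         chain_map[label] = resname
--         label = next_label(label)
--     return chain_map
-- ===== Notes on version B (the rewrite author's own statement) =====
-- stated objective: alternative
-- what changed: B replaces the per-index from-scratch divmod label computation with a running label advanced like an odometer (increment last char, carry Z->A, prepend A on overflow), assigning values in one pass.
import Mathlib
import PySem

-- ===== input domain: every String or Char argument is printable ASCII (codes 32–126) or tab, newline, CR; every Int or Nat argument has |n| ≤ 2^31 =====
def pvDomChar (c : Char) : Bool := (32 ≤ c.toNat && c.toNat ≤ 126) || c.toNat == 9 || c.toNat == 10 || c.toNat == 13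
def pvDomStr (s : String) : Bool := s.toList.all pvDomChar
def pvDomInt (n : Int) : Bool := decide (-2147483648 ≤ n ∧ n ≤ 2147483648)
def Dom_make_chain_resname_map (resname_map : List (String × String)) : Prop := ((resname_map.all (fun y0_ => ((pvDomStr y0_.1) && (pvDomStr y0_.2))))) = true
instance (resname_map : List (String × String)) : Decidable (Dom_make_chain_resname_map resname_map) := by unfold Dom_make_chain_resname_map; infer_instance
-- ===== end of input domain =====

-- B maintains the running chain label as a bijective base-26 odometer (increment last char,
-- carry Z->A, prepend A on overflow) instead of A's per-index from-scratch divmod computation.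


-- ===== PORT A =====
-- the 'while True' loop of chain_label; the index from enumerate is a nonnegative count,
-- so it is carried as a Nat ('n -= 1' after a nonzero floordiv stays nonnegative)
def chainLabelLoop (n : Nat) (label : List Char) : List Char :=
  -- n, r = divmod(n, 26); label = chr(ord('A') + r) + label; if n == 0: break; n -= 1
  let q := n / 26
  let r := n % 26
  let label' := Char.ofNat (65 + r) :: label
  if q = 0 then label' else chainLabelLoop (q - 1) label'
termination_by n
decreasing_by have := Nat.div_le_self n 26; omega

def chain_label (n : Nat) : String := String.ofList (chainLabelLoop n [])

-- for idx, (_, resname) in enumerate(resname_map.items()): chain_map[chain_label(idx)] = resname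
-- (the input association list is read as the Python dict: PySem.Dict.ofList; enumerate is a Nat counter)
def make_chain_resname_map (resname_map : List (String × String)) : List (String × String) :=
  ((PySem.Dict.ofList resname_map).items.foldl
    (fun (st : PySem.Dict String String × Nat) p =>
      (st.1.insert (chain_label st.2) p.2, st.2 + 1))
    (PySem.Dict.empty, 0)).1.items

-- ===== PORT B =====
-- next_label's while loop scans the label from its END; the port recurses on the REVERSED
-- char list (exact: 'Z' becomes 'A' and the carry moves left; past the front an 'A' is prepended)
def succRev : List Char → List Char
  | [] => ['A']
  | c :: rest => if c = 'Z' then 'A' :: succRev rest else Char.ofNat (c.toNat + 1) :: rest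

def nextLabel (label : List Char) : List Char := (succRev label.reverse).reverse

-- label = "A"; for resname in resname_map.values(): chain_map[label] = resname; label = next_label(label)
def make_chain_resname_map_alt (resname_map : List (String × String)) : List (String × String) :=
  ((PySem.Dict.ofList resname_map).values.foldl
    (fun (st : PySem.Dict String String × List Char) resname =>
      (st.1.insert (String.ofList st.2) resname, nextLabel st.2))
    (PySem.Dict.empty, ['A'])).1.items

-- ===== PRECONDITION & SPEC =====
def Spec_make_chain_resname_map (resname_map : List (String × String)) (out : List (String × String)) : Prop := out = make_chain_resname_map_alt resname_map
instance (resname_map : List (String × String)) (out : List (String × String)) : Decidable (Spec_make_chain_resname_map resname_map out) := by unfold Spec_make_chain_resname_map; infer_instance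

-- ===== CLAIM (what is proved, stated in full; the proofs are below) =====
def Claim_equal_make_chain_resname_map : Prop := ∀ (resname_map : List (String × String)), Dom_make_chain_resname_map resname_map → Spec_make_chain_resname_map resname_map (make_chain_resname_map resname_map)

-- ===== LEMMAS AND PROOFS =====

-- the label of n, least-significant digit FIRST (the reverse of chain_label n)
def revLabel (n : Nat) : List Char :=
  Char.ofNat (65 + n % 26) ::
    (if n / 26 = 0 then [] else revLabel (n / 26 - 1))
termination_by n
decreasing_by have := Nat.div_le_self n 26; omega

lemma chainLabelLoop_eq (n : Nat) : ∀ acc, chainLabelLoop n acc = (revLabel n).reverse ++ acc := by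
  induction n using Nat.strong_induction_on with
  | _ n ih =>
    intro acc
    rw [chainLabelLoop, revLabel]
    by_cases h : n / 26 = 0
    · simp [h]
    · have hlt : n / 26 - 1 < n := by have := Nat.div_le_self n 26; omega
      simp [h, ih _ hlt]

lemma toNat_digit (r : Nat) (h : r < 26) : (Char.ofNat (65 + r)).toNat = 65 + r := by
  have : (65 + r).isValidChar := by unfold Nat.isValidChar; omega
  simp [Char.ofNat, this]

lemma succRev_revLabel (n : Nat) : succRev (revLabel n) = revLabel (n + 1) := by
  induction n using Nat.strong_induction_on with
  | _ n ih =>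
    rw [revLabel, succRev]
    have hr : n % 26 < 26 := Nat.mod_lt _ (by norm_num)
    by_cases h25 : n % 26 = 25
    · have hz : Char.ofNat (65 + n % 26) = 'Z' := by rw [h25]
      rw [if_pos hz]
      by_cases hq : n / 26 = 0
      · have hn : n = 25 := by omega
        subst hn
        have e1 : (25:Nat) / 26 = 0 := by norm_num
        rw [if_pos e1]
        conv_rhs => rw [revLabel]
        norm_num [succRev]
        conv_rhs => rw [revLabel]
        decide
      · have hlt : n / 26 - 1 < n := by have := Nat.div_le_self n 26; omega
        rw [if_neg hq, ih _ hlt]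
        conv_rhs => rw [revLabel]
        have h1 : (n + 1) % 26 = 0 := by omega
        have h2 : (n + 1) / 26 = n / 26 + 1 := by omega
        rw [h1, h2]
        have h3 : n / 26 - 1 + 1 = n / 26 := by omega
        have h4 : n / 26 + 1 - 1 = n / 26 := by omega
        rw [h3, h4]
        rfl
    · have hnz : Char.ofNat (65 + n % 26) ≠ 'Z' := by
        intro hc
        have := congrArg Char.toNat hc
        rw [toNat_digit _ hr] at this
        simp [Char.toNat] at this
        omega
      rw [if_neg hnz, toNat_digit _ hr]
      conv_rhs => rw [revLabel]
      have h1 : (n + 1) % 26 = n % 26 + 1 := by omega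
      have h2 : (n + 1) / 26 = n / 26 := by omega
      rw [h1, h2]
      ring_nf

lemma nextLabel_rev (n : Nat) : nextLabel (revLabel n).reverse = (revLabel (n + 1)).reverse := by
  rw [nextLabel, List.reverse_reverse, succRev_revLabel]

lemma fold_eq (vs : List String) : ∀ (d : PySem.Dict String String) (n : Nat),
    (vs.foldl (fun (st : PySem.Dict String String × Nat) v =>
        (st.1.insert (chain_label st.2) v, st.2 + 1)) (d, n)).1
    = (vs.foldl (fun (st : PySem.Dict String String × List Char) v =>
        (st.1.insert (String.ofList st.2) v, nextLabel st.2)) (d, (revLabel n).reverse)).1 := by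
  induction vs with
  | nil => intro d n; rfl
  | cons v vs ih =>
    intro d n
    simp only [List.foldl_cons]
    rw [nextLabel_rev]
    have hk : chain_label n = String.ofList (revLabel n).reverse := by
      rw [chain_label, chainLabelLoop_eq, List.append_nil]
    rw [hk, ih]

-- ===== VERDICT (by name: the statement is the Claim_ definition above) =====
theorem make_chain_resname_map_spec : Claim_equal_make_chain_resname_map := by
  intro rm _
  unfold Spec_make_chain_resname_map make_chain_resname_map make_chain_resname_map_alt
  have hv : (PySem.Dict.ofList rm).values
      = (PySem.Dict.ofList rm).items.map (·.2) := rfl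
  rw [hv]
  have := fold_eq ((PySem.Dict.ofList rm).items.map (·.2)) PySem.Dict.empty 0
  have hrev : (revLabel 0).reverse = ['A'] := by rw [revLabel]; rfl
  rw [List.foldl_map, hrev] at this
  exact congrArg PySem.Dict.items this
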